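-- pv_equiv track=rewrite | github.com/aymak91/HackerRankSolutions | 2023/2023-07-31/chess_tournament.py | getPotentialOfWinner
-- ===== SOURCE A (Python) =====
-- def getPotentialOfWinner(potential, k):
--     # Initialize a variable to keep track of the number of consecutive rounds won by the current winner
--     rounds_won = 0
--
--     # Set the initial winner as the first player in the 'potential' list
--     curr_winner = potential[0]
--
--     # Iterate over the 'potential' list starting from the second player (index 1)
--     for i in range(1, len(potential)):
--         # Get the potential of the current player
--         player = potential[i]
--
--         # Check if the current player's potential is greater than the current winner's potential
--         if player > curr_winner:
--             # If the current player has greater potential, reset the count of consecutive rounds won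
--             rounds_won = 0
--
--             # Update the current winner to the current player
--             curr_winner = player
--
--         # Increment the count of consecutive rounds won by the current winner
--         rounds_won += 1
--
--         # Check if the current winner has won 'k' consecutive rounds
--         if rounds_won == k:
--             # If the current winner has won 'k' consecutive rounds, stop the loop and return the current winner's potential
--             break
--
--     # Return the potential of the winner who won 'k' consecutive rounds
--     return curr_winner
-- ===== SOURCE B (Python) =====
-- def getPotentialOfWinner(potential, k):
--     # Champion-jump tournament: instead of counting wins one element at a time,
--     # repeatedly measure the whole run of players the current champion beats
--     # and compare k against that run length in one shot.
--     champ, rest, need = potential[0], potential[1:], k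
--     while True:
--         beaten = 0
--         while beaten < len(rest) and rest[beaten] <= champ:
--             beaten += 1
--         if beaten == len(rest) or 1 <= need <= beaten:
--             return champ
--         if k == 1:
--             return rest[beaten]
--         champ, rest, need = rest[beaten], rest[beaten + 1:], k - 1
-- ===== Notes on version B (the rewrite author's own statement) =====
-- stated objective: alternative
-- what changed: B replaces A's element-by-element scan with a per-element win counter by a champion-jump loop: it measures the whole run of players the current champion beats in one inner scan, decides by comparing k against that run length, and jumps directly to the next champion.
import Mathlib
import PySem

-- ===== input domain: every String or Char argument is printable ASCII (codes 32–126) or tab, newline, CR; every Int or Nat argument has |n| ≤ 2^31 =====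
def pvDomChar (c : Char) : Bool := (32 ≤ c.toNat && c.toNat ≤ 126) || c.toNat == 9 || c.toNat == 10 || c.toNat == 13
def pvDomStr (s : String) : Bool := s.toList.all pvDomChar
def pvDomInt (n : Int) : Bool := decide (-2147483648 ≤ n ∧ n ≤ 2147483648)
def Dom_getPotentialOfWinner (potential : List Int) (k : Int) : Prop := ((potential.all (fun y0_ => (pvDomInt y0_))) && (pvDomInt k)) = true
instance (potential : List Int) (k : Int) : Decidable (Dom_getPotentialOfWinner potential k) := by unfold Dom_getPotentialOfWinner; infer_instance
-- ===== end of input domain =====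

-- B replaces A's per-element win counter by a champion-jump loop (measure the run the
-- champion beats, compare k against its length, jump to the next champion): same values,
-- different traversal structure (objective: alternative).

-- ===== PORT A =====
-- A's for-loop over potential[1:] with mutable state (curr_winner, rounds_won).
def pvLoopA (k : Int) (curr : Int) (r : Int) : List Int → Int
  | [] => curr
  | x :: xs =>
    if curr < x then
      -- reset rounds_won to 0, curr = x, then rounds_won += 1 (= 1), check == k
      (if (1 : Int) = k then x else pvLoopA k x 1 xs)
    else
      (if r + 1 = k then curr else pvLoopA k curr (r + 1) xs)

def getPotentialOfWinner (potential : List Int) (k : Int) : Int :=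
  match potential with
  | [] => 0  -- potential[0] raises IndexError in Python; excluded by Pre_
  | h :: t => pvLoopA k h 0 t

-- ===== PORT B =====
-- inner while-loop: length of the initial run of players the champion beats
def pvBeaten (champ : Int) : List Int → Nat
  | [] => 0
  | x :: xs => if x ≤ champ then pvBeaten champ xs + 1 else 0

theorem pvBeaten_le (champ : Int) (xs : List Int) : pvBeaten champ xs ≤ xs.length := by
  induction xs with
  | nil => simp [pvBeaten]
  | cons x xs ih => simp only [pvBeaten, List.length_cons]; split <;> omega

def pvLoopB (k : Int) (champ : Int) (need : Int) (rest : List Int) : Int :=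
  if hb : pvBeaten champ rest = rest.length then champ
  else if 1 ≤ need ∧ need ≤ ((pvBeaten champ rest : Nat) : Int) then champ
  else if k = 1 then rest.getD (pvBeaten champ rest) 0
  else pvLoopB k (rest.getD (pvBeaten champ rest) 0) (k - 1) (rest.drop (pvBeaten champ rest + 1))
termination_by rest.length
decreasing_by
  have h := pvBeaten_le champ rest
  simp only [List.length_drop]
  omega

def getPotentialOfWinner_alt (potential : List Int) (k : Int) : Int :=
  match potential with
  | [] => 0  -- potential[0] raises IndexError in Python; excluded by Pre_
  | h :: t => pvLoopB k h k t

-- ===== PRECONDITION & SPEC =====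
-- Pre_ excludes only the empty list, on which both Pythons raise IndexError at potential[0].
def Pre_getPotentialOfWinner (potential : List Int) (k : Int) : Prop := potential ≠ []
instance (potential : List Int) (k : Int) : Decidable (Pre_getPotentialOfWinner potential k) := by
  unfold Pre_getPotentialOfWinner; infer_instance

def pvWitness_getPotentialOfWinner : List Int × Int := ([3, 2, 5, 1], 2)

def Spec_getPotentialOfWinner (potential : List Int) (k : Int) (out : Int) : Prop := out = getPotentialOfWinner_alt potential k
instance (potential : List Int) (k : Int) (out : Int) : Decidable (Spec_getPotentialOfWinner potential k out) := by unfold Spec_getPotentialOfWinner; infer_instance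

-- ===== CLAIM (what is proved, stated in full; the proofs are below) =====
def Claim_equal_getPotentialOfWinner : Prop := ∀ (potential : List Int) (k : Int), Dom_getPotentialOfWinner potential k → Pre_getPotentialOfWinner potential k → Spec_getPotentialOfWinner potential k (getPotentialOfWinner potential k)

-- ===== LEMMAS AND PROOFS =====

-- A's loop, expressed one champion-run at a time: either the scan ends inside the run,
-- or the break fires inside the run, or the loop reaches the first stronger player.
theorem pvLoopA_run (k curr : Int) (rest : List Int) : ∀ (r : Int),
    pvLoopA k curr r rest =
      (if pvBeaten curr rest = rest.length then curr
       else if r + 1 ≤ k ∧ k ≤ r + ((pvBeaten curr rest : Nat) : Int) then curr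
       else if k = 1 then rest.getD (pvBeaten curr rest) 0
       else pvLoopA k (rest.getD (pvBeaten curr rest) 0) 1 (rest.drop (pvBeaten curr rest + 1))) := by
  induction rest with
  | nil => intro r; simp [pvLoopA, pvBeaten]
  | cons x xs ih =>
    intro r
    by_cases hlt : curr < x
    · have hxle : ¬ x ≤ curr := by omega
      simp only [pvLoopA, pvBeaten, List.length_cons, if_pos hlt, if_neg hxle,
        List.getD_cons_zero, List.drop_succ_cons, List.drop_zero]
      split_ifs <;> first | rfl | omega | (exfalso; omega)
    · have hxle : x ≤ curr := by omega
      simp only [pvLoopA, pvBeaten, List.length_cons, if_neg hlt, if_pos hxle]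
      have hb := pvBeaten_le curr xs
      by_cases hbreak : r + 1 = k
      · simp only [if_pos hbreak]
        split_ifs <;> first | rfl | omega
      · simp only [if_neg hbreak]
        rw [ih (r + 1)]
        simp only [List.getD_cons_succ, List.drop_succ_cons]
        split_ifs <;> first | rfl | omega

-- The two loops agree under the correspondence need = k - r.
theorem pvLoopA_eq_pvLoopB (k : Int) : ∀ (rest : List Int) (curr r : Int),
    pvLoopA k curr r rest = pvLoopB k curr (k - r) rest := by
  intro rest
  induction hn : rest.length using Nat.strong_induction_on generalizing rest with
  | _ n ih =>
    intro curr r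
    rw [pvLoopA_run, pvLoopB]
    have hble := pvBeaten_le curr rest
    split_ifs <;> first
      | rfl
      | (exfalso; omega)
      | · -- recursive branch: strictly shorter suffix
          have hlt : (rest.drop (pvBeaten curr rest + 1)).length < n := by
            simp only [List.length_drop]; omega
          have := ih _ hlt (rest.drop (pvBeaten curr rest + 1)) rfl
            (rest.getD (pvBeaten curr rest) 0) 1
          simpa using this

-- ===== VERDICT (by name: the statement is the Claim_ definition above) =====
theorem getPotentialOfWinner_spec : Claim_equal_getPotentialOfWinner := by
  intro potential k _ hpre
  unfold Spec_getPotentialOfWinner getPotentialOfWinner getPotentialOfWinner_alt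
  match potential with
  | [] => exact absurd rfl hpre
  | h :: t =>
    have := pvLoopA_eq_pvLoopB k t h 0
    simpa using this
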